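-- pv_equiv track=rewrite | github.com/math-ku/compstat | scripts/python_rmd_to_qmd.py | convert_sidenotes
-- ===== SOURCE A (Python) =====
-- def convert_sidenotes(lines):
--     out = []
--     n = len(lines)
--     i = 0
--     while i < n:
--         if lines[i].strip() == "???":
--             out.append("::: {.notes}\n")
--             i += 1
--             # Collect lines until next slide delimiter or end of file
--             while i < n and not lines[i].strip().startswith("---"):
--                 out.append(lines[i])
--                 i += 1
--             out.append(":::\n\n")
--         else:
--             out.append(lines[i])
--             i += 1
--     return out
-- ===== SOURCE B (Python) =====
-- def _find(xs, p):
--     for i, x in enumerate(xs):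
--         if p(x):
--             return i
--     return None
--
--
-- def convert_sidenotes(lines):
--     # Segment-based: repeatedly locate the next "???" marker, copy the prefix,
--     # slice out the notes body up to the next "---" delimiter, and continue.
--     out = []
--     rest = lines
--     while True:
--         k = _find(rest, lambda l: l.strip() == "???")
--         if k is None:
--             out += rest
--             return out
--         out += rest[:k]
--         out.append("::: {.notes}\n")
--         body0 = rest[k + 1:]
--         m = _find(body0, lambda l: l.strip().startswith("---"))
--         if m is None:
--             m = len(body0)
--         out += body0[:m]
--         out.append(":::\n\n")
--         rest = body0[m:]
-- ===== Notes on version B (the rewrite author's own statement) =====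
-- stated objective: alternative
-- what changed: Replaces A's index-driven state machine (outer while with a nested consuming inner while) by a segment-based scan that repeatedly finds the next '???' marker index, copies the prefix slice, slices out the notes body up to the next '---' index, and continues on the remainder.
import Mathlib
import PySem

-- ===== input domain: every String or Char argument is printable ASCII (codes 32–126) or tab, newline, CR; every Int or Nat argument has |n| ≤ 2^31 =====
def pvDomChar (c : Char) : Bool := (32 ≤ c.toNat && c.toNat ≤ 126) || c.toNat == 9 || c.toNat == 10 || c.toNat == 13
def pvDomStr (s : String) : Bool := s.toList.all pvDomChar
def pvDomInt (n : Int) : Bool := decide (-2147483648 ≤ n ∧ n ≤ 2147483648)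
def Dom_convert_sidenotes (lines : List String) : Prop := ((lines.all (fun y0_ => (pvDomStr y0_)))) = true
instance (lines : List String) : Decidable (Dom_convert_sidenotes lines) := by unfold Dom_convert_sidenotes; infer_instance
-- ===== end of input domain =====

-- B replaces A's index-driven nested while loops by a segment-based scan: find the
-- next "???" marker, copy the prefix, slice out the notes body up to the next "---"
-- delimiter, recurse on the remainder (objective: alternative decomposition, same cost).

-- ===== PORT A =====
-- inner while loop of A: collect lines until one strips to a "---" prefix (or EOF);
-- returns (collected lines, remaining lines)
def pvInnerA : List String → List String × List String
  | [] => ([], [])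
  | l :: rest =>
    if PySem.Str.startswith (PySem.Str.strip l) "---" then ([], l :: rest)
    else
      let p := pvInnerA rest
      (l :: p.1, p.2)

theorem pvInnerA_snd_le (xs : List String) : (pvInnerA xs).2.length ≤ xs.length := by
  induction xs with
  | nil => simp [pvInnerA]
  | cons l rest ih =>
    simp only [pvInnerA]
    split
    · simp
    · simpa using Nat.le_succ_of_le ih

def convert_sidenotes (lines : List String) : List String :=
  match lines with
  | [] => []
  | l :: rest =>
    if PySem.Str.strip l == "???" then
      "::: {.notes}\n" :: ((pvInnerA rest).1 ++ ":::\n\n" :: convert_sidenotes (pvInnerA rest).2)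
    else
      l :: convert_sidenotes rest
termination_by lines.length
decreasing_by
  · have := pvInnerA_snd_le rest; simp; omega
  · simp

-- ===== PORT B =====
-- port of Source B's _find: index of the first element satisfying p, none if absent
def pvFind (xs : List String) (p : String → Bool) : Option Nat :=
  match xs with
  | [] => none
  | x :: rest => if p x then some 0 else (pvFind rest p).map (· + 1)

theorem pvFind_lt_length (xs : List String) (p : String → Bool) (k : Nat)
    (h : pvFind xs p = some k) : k < xs.length := by
  induction xs generalizing k with
  | nil => simp [pvFind] at h
  | cons x rest ih =>
    simp only [pvFind] at h
    split at h
    · cases h; simp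
    · cases hr : pvFind rest p with
      | none => rw [hr] at h; simp at h
      | some j => rw [hr] at h; simp at h; subst h; simpa using ih j hr

def convert_sidenotes_alt (rest : List String) : List String :=
  match hf : pvFind rest (fun l => PySem.Str.strip l == "???") with
  | none => rest
  | some k =>
    let body0 := rest.drop (k + 1)
    let m := (pvFind body0 (fun l => PySem.Str.startswith (PySem.Str.strip l) "---")).getD body0.length
    rest.take k ++ "::: {.notes}\n" :: body0.take m ++ ":::\n\n" :: convert_sidenotes_alt (body0.drop m)
termination_by rest.length
decreasing_by
  have hk := pvFind_lt_length _ _ _ hf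
  simp only [List.length_drop]
  omega

-- ===== PRECONDITION & SPEC =====
def Spec_convert_sidenotes (lines : List String) (out : List String) : Prop := out = convert_sidenotes_alt lines
instance (lines : List String) (out : List String) : Decidable (Spec_convert_sidenotes lines out) := by unfold Spec_convert_sidenotes; infer_instance

-- ===== CLAIM (what is proved, stated in full; the proofs are below) =====
def Claim_equal_convert_sidenotes : Prop := ∀ (lines : List String), Dom_convert_sidenotes lines → Spec_convert_sidenotes lines (convert_sidenotes lines)

-- ===== LEMMAS AND PROOFS =====

-- A's inner loop computes exactly Source B's slices around the first "---" index
theorem pvInnerA_eq_slices (xs : List String) :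
    pvInnerA xs =
      (xs.take ((pvFind xs (fun l => PySem.Str.startswith (PySem.Str.strip l) "---")).getD xs.length),
       xs.drop ((pvFind xs (fun l => PySem.Str.startswith (PySem.Str.strip l) "---")).getD xs.length)) := by
  induction xs with
  | nil => simp [pvInnerA, pvFind]
  | cons l rest ih =>
    simp only [pvInnerA, pvFind]
    split
    · simp
    · rw [ih]
      cases hr : pvFind rest (fun l => PySem.Str.startswith (PySem.Str.strip l) "---") with
      | none => simp
      | some j => simp [List.take_succ_cons, List.drop_succ_cons]

-- non-dependent equation lemmas for convert_sidenotes_alt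
theorem alt_none (rest : List String)
    (h : pvFind rest (fun l => PySem.Str.strip l == "???") = none) :
    convert_sidenotes_alt rest = rest := by
  rw [convert_sidenotes_alt.eq_def]
  split
  · rfl
  · rename_i k hf; rw [h] at hf; cases hf

theorem alt_some (rest : List String) (k : Nat)
    (h : pvFind rest (fun l => PySem.Str.strip l == "???") = some k) :
    convert_sidenotes_alt rest =
      (rest.take k ++ "::: {.notes}\n" ::
        (rest.drop (k + 1)).take
            ((pvFind (rest.drop (k + 1)) (fun l => PySem.Str.startswith (PySem.Str.strip l) "---")).getD
              (rest.drop (k + 1)).length)) ++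
          ":::\n\n" ::
            convert_sidenotes_alt
              ((rest.drop (k + 1)).drop
                ((pvFind (rest.drop (k + 1)) (fun l => PySem.Str.startswith (PySem.Str.strip l) "---")).getD
                  (rest.drop (k + 1)).length)) := by
  rw [convert_sidenotes_alt.eq_def]
  split
  · rename_i hf; rw [h] at hf; cases hf
  · rename_i k' hf; rw [h] at hf; injection hf with hk; subst hk; rfl

theorem pvFind_cons_not (l : String) (rest : List String)
    (h : (PySem.Str.strip l == "???") = false) :
    pvFind (l :: rest) (fun l => PySem.Str.strip l == "???")
      = (pvFind rest (fun l => PySem.Str.strip l == "???")).map (· + 1) := by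
  simp only [pvFind, h, Bool.false_eq_true, if_false]

theorem alt_cons_not (l : String) (rest : List String)
    (h : (PySem.Str.strip l == "???") = false) :
    convert_sidenotes_alt (l :: rest) = l :: convert_sidenotes_alt rest := by
  cases hr : pvFind rest (fun l => PySem.Str.strip l == "???") with
  | none =>
    rw [alt_none (l :: rest) (by rw [pvFind_cons_not l rest h, hr]; rfl), alt_none rest hr]
  | some k =>
    rw [alt_some (l :: rest) (k + 1) (by rw [pvFind_cons_not l rest h, hr]; rfl),
        alt_some rest k hr]
    simp only [List.take_succ_cons, List.drop_succ_cons, List.cons_append]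

theorem main_eq : ∀ (n : Nat) (lines : List String), lines.length ≤ n →
    convert_sidenotes lines = convert_sidenotes_alt lines := by
  intro n
  induction n with
  | zero =>
    intro lines h
    have : lines = [] := by cases lines <;> simp_all
    subst this
    rw [convert_sidenotes.eq_def, alt_none [] (by rfl)]
  | succ n ih =>
    intro lines h
    cases lines with
    | nil => rw [convert_sidenotes.eq_def, alt_none [] (by rfl)]
    | cons l rest =>
      by_cases hq : (PySem.Str.strip l == "???") = true
      · rw [convert_sidenotes.eq_def,
            alt_some (l :: rest) 0 (by simp only [pvFind, hq, if_true])]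
        simp only [hq, if_true, List.take_zero, List.drop_succ_cons, List.drop_zero,
          List.nil_append, List.cons_append]
        rw [pvInnerA_eq_slices]
        simp only []
        rw [ih]
        simp only [List.length_drop]
        simp at h
        omega
      · rw [convert_sidenotes.eq_def]
        simp only [hq, if_neg, Bool.not_eq_true]
        rw [alt_cons_not l rest (by simpa using hq)]
        simp only [List.cons.injEq, true_and]
        simp at h
        exact ih rest (by omega)

-- ===== VERDICT (by name: the statement is the Claim_ definition above) =====
theorem convert_sidenotes_spec : Claim_equal_convert_sidenotes := by
  intro lines _
  unfold Spec_convert_sidenotes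
  exact main_eq lines.length lines (le_refl _)
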